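-- pv_equiv track=rewrite | github.com/iamstmvasan/python_programs | Cover_Buildings.py | solution
-- ===== SOURCE A (Python) =====
-- def solution(H):
--     # write your code in Python 3.6
--     banner = []
--     for i in range(len(H)-1):
--         a = H[0:i+1]
--         b = H[i+1:]
--         c = max(a) * len(a)
--         d = max(b) * len(b)
--         e = c+d
--         banner.append(e)
--     return min(banner)
-- ===== SOURCE B (Python) =====
-- def solution(H):
--     # O(n): suffix maxima built once, then one pass with a running prefix max.
--     suf = []
--     for x in reversed(H):
--         suf.append(x if not suf else max(x, suf[-1]))
--     suf.reverse()
--     n = len(H)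
--     best = None
--     pm = H[0]
--     for i in range(1, n):
--         val = pm * i + suf[i] * (n - i)
--         if best is None or val < best:
--             best = val
--         pm = max(pm, H[i])
--     return best
-- ===== Notes on version B (the rewrite author's own statement) =====
-- stated objective: faster
-- what changed: A recomputes max over both slices for every split (quadratic); B builds a suffix-max array once and keeps a running prefix max, computing all split costs in one pass.
import Mathlib
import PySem

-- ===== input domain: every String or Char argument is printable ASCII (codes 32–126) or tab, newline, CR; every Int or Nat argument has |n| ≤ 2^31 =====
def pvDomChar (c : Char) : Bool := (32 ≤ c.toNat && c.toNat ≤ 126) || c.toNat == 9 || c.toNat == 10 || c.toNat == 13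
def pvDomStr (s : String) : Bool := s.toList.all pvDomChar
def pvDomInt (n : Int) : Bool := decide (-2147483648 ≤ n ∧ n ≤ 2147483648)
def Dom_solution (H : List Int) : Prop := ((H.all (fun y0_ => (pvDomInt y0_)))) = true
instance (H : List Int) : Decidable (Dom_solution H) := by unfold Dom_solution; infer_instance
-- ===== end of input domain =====

-- B replaces A's quadratic slice-and-max per split with a suffix-max array and a
-- running prefix max, one pass over splits (objective: faster, asymptotic).

-- ===== PORT A =====
-- max(l)/min(l) are PySem.List.max?/min?; .getD 0 is never reached under Pre_ (nonempty lists).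
def solution (H : List Int) : Int :=
  let banner := (PySem.List.pyRange 0 ((H.length : Int) - 1) 1).foldl
    (fun banner i =>
      let a := PySem.List.slice H (some 0) (some (i + 1))
      let b := PySem.List.slice H (some (i + 1)) none
      let c := ((PySem.List.max? a (fun y => y)).getD 0) * (a.length : Int)
      let d := ((PySem.List.max? b (fun y => y)).getD 0) * (b.length : Int)
      banner ++ [c + d]) []
  (PySem.List.min? banner (fun y => y)).getD 0

-- ===== PORT B =====
-- reading the first element raises in Python on an empty list; headD 0 is never reached under Pre_.
def solution_alt (H : List Int) : Int :=
  let suf := (H.reverse.foldl (fun suf x =>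
      suf ++ [match suf.getLast? with | none => x | some m => max x m]) []).reverse
  let n : Int := (H.length : Int)
  let r := (PySem.List.pyRange 1 n 1).foldl
    (fun (st : Option Int × Int) i =>
      let val := st.2 * i + (PySem.List.pyGetD suf i 0) * (n - i)
      let best := match st.1 with
        | none => some val
        | some b => if val < b then some val else some b
      (best, max st.2 (PySem.List.pyGetD H i 0)))
    (none, H.headD 0)
  r.1.getD 0

-- ===== PRECONDITION & SPEC =====
-- A raises on lists of length < 2: the banner list has no entries, so Python's min raises ValueError.
def Pre_solution (H : List Int) : Prop := 2 ≤ H.length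
instance (H : List Int) : Decidable (Pre_solution H) := by unfold Pre_solution; infer_instance
def pvWitness_solution : List Int := [1, 2]

def Spec_solution (H : List Int) (out : Int) : Prop := out = solution_alt H
instance (H : List Int) (out : Int) : Decidable (Spec_solution H out) := by unfold Spec_solution; infer_instance

-- ===== CLAIM (what is proved, stated in full; the proofs are below) =====
def Claim_equal_solution : Prop := ∀ (H : List Int), Dom_solution H → Pre_solution H → Spec_solution H (solution H)

-- ===== LEMMAS AND PROOFS =====

-- max of a nonempty list (0 on [], never used there)
def dmax : List Int → Int
  | [] => 0
  | y :: t => t.foldl max y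

-- suffix maxima: (sufList H)[j] = dmax (H.drop j)
def sufList : List Int → List Int
  | [] => []
  | x :: t => match sufList t with
    | [] => [x]
    | m :: ms => max x m :: m :: ms

-- value of the split with k elements on the left, 1 ≤ k ≤ n-1
def Fval (H : List Int) (k : Nat) : Int :=
  dmax (H.take k) * (k : Int) + dmax (H.drop k) * ((H.length - k : Nat) : Int)

def minStep : Option Int → Int → Option Int
  | none, v => some v
  | some b, v => some (min b v)

lemma foldl_max_max (u : List Int) (a b : Int) :
    u.foldl max (max a b) = max a (u.foldl max b) := by
  induction u generalizing b with
  | nil => rfl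
  | cons c u ih => simpa [max_assoc] using ih (max b c)

lemma max?_getD_eq_dmax (l : List Int) (h : l ≠ []) :
    (PySem.List.max? l (fun y => y)).getD 0 = dmax l := by
  cases l with
  | nil => exact absurd rfl h
  | cons x t => simp [PySem.List.max?_id_cons, dmax]

lemma sufList_nil_iff (H : List Int) : sufList H = [] ↔ H = [] := by
  cases H with
  | nil => simp [sufList]
  | cons x t =>
    simp only [sufList]
    cases h : sufList t <;> simp

lemma sufList_build (H : List Int) :
    H.reverse.foldl (fun suf x =>
      suf ++ [match suf.getLast? with | none => x | some m => max x m]) []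
      = (sufList H).reverse := by
  induction H with
  | nil => rfl
  | cons x t ih =>
    rw [List.reverse_cons, List.foldl_append, ih]
    simp only [List.foldl, List.getLast?_reverse]
    cases h : sufList t with
    | nil => simp [sufList, h]
    | cons m ms => simp [sufList, h]

lemma sufList_getD (H : List Int) (j : Nat) (hj : j < H.length) :
    (sufList H).getD j 0 = dmax (H.drop j) := by
  induction H generalizing j with
  | nil => simp at hj
  | cons x t ih =>
    cases j with
    | zero =>
      cases t with
      | nil => simp [sufList, dmax]
      | cons y u =>
        cases h : sufList (y :: u) with
        | nil => rw [sufList_nil_iff] at h; exact absurd h (by simp)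
        | cons m ms =>
          have hm : m = dmax (y :: u) := by
            have := ih 0 (by simp)
            simpa [h] using this
          rw [show sufList (x :: y :: u) = match sufList (y :: u) with
                | [] => [x] | m :: ms => max x m :: m :: ms from rfl, h]
          simp only [List.getD, List.drop]
          simp [hm, dmax, foldl_max_max]
    | succ j =>
      have hj' : j < t.length := by simpa using hj
      cases h : sufList t with
      | nil =>
        rw [sufList_nil_iff] at h; subst h; simp at hj'
      | cons m ms =>
        have := ih j hj'
        simp only [sufList, h]
        simpa [h] using this

lemma dmax_append_singleton (l : List Int) (x : Int) (h : l ≠ []) :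
    dmax (l ++ [x]) = max (dmax l) x := by
  cases l with
  | nil => exact absurd rfl h
  | cons y t => simp [dmax, List.foldl_append]

lemma dmax_take_succ (H : List Int) (s : Nat) (hs : 1 ≤ s) (hlt : s < H.length) :
    dmax (H.take (s + 1)) = max (dmax (H.take s)) (H.getD s 0) := by
  have hgs : H[s]? = some H[s] := List.getElem?_eq_getElem hlt
  rw [List.take_add_one, hgs]
  simp only [Option.toList_some]
  rw [dmax_append_singleton _ _ (by
    have : (H.take s).length = s := by simp [Nat.min_eq_left (Nat.le_of_lt hlt)]
    intro hnil; rw [hnil] at this; simp at this; omega)]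
  simp [List.getD_eq_getElem?_getD, hgs]

lemma minStep_match (b : Option Int) (v : Int) :
    (match b with
      | none => some v
      | some b0 => if v < b0 then some v else some b0) = minStep b v := by
  cases b with
  | none => rfl
  | some b0 =>
    simp only [minStep]
    rcases le_or_gt b0 v with h | h
    · simp [min_eq_left h, if_neg (not_lt.mpr h)]
    · simp [min_eq_right (le_of_lt h), if_pos h]

lemma foldl_minStep_some (L : List Int) (a : Int) :
    L.foldl minStep (some a) = some (L.foldl min a) := by
  induction L generalizing a with
  | nil => rfl
  | cons v L ih => simp [List.foldl, minStep, ih]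

-- the B main loop computes the running min of Fval over positions s, s+1, …, H.length-1
lemma B_loop (H : List Int) (m : Nat) : ∀ (s : Nat) (best : Option Int), 1 ≤ s →
    s + m = H.length →
    ((PySem.List.pyRange (s : Int) (H.length : Int) 1).foldl
      (fun (st : Option Int × Int) i =>
        let val := st.2 * i + (PySem.List.pyGetD (sufList H) i 0) * ((H.length : Int) - i)
        let best := match st.1 with
          | none => some val
          | some b => if val < b then some val else some b
        (best, max st.2 (PySem.List.pyGetD H i 0)))
      (best, dmax (H.take s))).1
    = ((List.range m).map (fun k => Fval H (s + k))).foldl minStep best := by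
  induction m with
  | zero =>
    intro s best _ hsm
    rw [PySem.List.pyRange_one_eq_nil (by omega)]
    simp
  | succ m ih =>
    intro s best hs hsm
    have hslt : s < H.length := by omega
    rw [PySem.List.pyRange_one_cons (by exact_mod_cast hslt)]
    simp only [List.foldl]
    have hsuf : PySem.List.pyGetD (sufList H) (s : Int) 0 = dmax (H.drop s) := by
      rw [PySem.List.pyGetD_natCast, sufList_getD H s hslt]
    have hH : PySem.List.pyGetD H (s : Int) 0 = H.getD s 0 := PySem.List.pyGetD_natCast H s 0
    have hval : dmax (H.take s) * (s : Int) + (PySem.List.pyGetD (sufList H) (s : Int) 0) * ((H.length : Int) - (s : Int)) = Fval H s := by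
      rw [hsuf, Fval]
      congr 1
      have : ((H.length - s : Nat) : Int) = (H.length : Int) - (s : Int) := by omega
      rw [this]
    have hpm : max (dmax (H.take s)) (PySem.List.pyGetD H (s : Int) 0) = dmax (H.take (s + 1)) := by
      rw [hH, dmax_take_succ H s hs hslt]
    have hcast : ((s : Int) + 1) = ((s + 1 : Nat) : Int) := by push_cast; ring
    rw [hval, minStep_match, hpm, hcast, ih (s + 1) (minStep best (Fval H s)) (by omega) (by omega)]
    rw [List.range_succ_eq_map]
    simp only [List.map_cons, List.map_map, List.foldl_cons]
    congr 1
    apply List.map_congr_left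
    intro k _
    simp only [Function.comp, Nat.succ_eq_add_one]
    congr 1
    omega

-- A's banner list equals the Fval list
lemma A_elem (H : List Int) (k : Nat) (hk : k + 1 < H.length) :
    (let a := PySem.List.slice H (some 0) (some ((k : Int) + 1))
     let b := PySem.List.slice H (some ((k : Int) + 1)) none
     ((PySem.List.max? a (fun y => y)).getD 0) * (a.length : Int) +
     ((PySem.List.max? b (fun y => y)).getD 0) * (b.length : Int)) = Fval H (k + 1) := by
  have hc : ((k : Int) + 1) = ((k + 1 : Nat) : Int) := by push_cast; ring
  simp only [hc]
  rw [PySem.List.slice_zero_start, PySem.List.slice_to_natCast, PySem.List.slice_from_natCast]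
  have hta : H.take (k + 1) ≠ [] := by
    intro h
    have := congrArg List.length h
    simp [Nat.min_eq_left (Nat.le_of_lt hk)] at this
  have htb : H.drop (k + 1) ≠ [] := by
    intro h
    have := congrArg List.length h
    simp at this; omega
  rw [max?_getD_eq_dmax _ hta, max?_getD_eq_dmax _ htb, Fval]
  have hla : (H.take (k + 1)).length = k + 1 := by
    simp [Nat.min_eq_left (Nat.le_of_lt hk)]
  have hlb : (H.drop (k + 1)).length = H.length - (k + 1) := by simp
  rw [hla, hlb]

lemma A_map (H : List Int) (h : 1 ≤ H.length) :
    List.map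
      (fun i =>
        ((PySem.List.max? (PySem.List.slice H (some 0) (some (i + 1))) (fun y => y)).getD 0) * ((PySem.List.slice H (some 0) (some (i + 1))).length : Int) +
        ((PySem.List.max? (PySem.List.slice H (some (i + 1)) none) (fun y => y)).getD 0) * ((PySem.List.slice H (some (i + 1)) none).length : Int))
      (List.map (fun k : Nat => (k : Int)) (List.range (H.length - 1)))
      = (List.range (H.length - 1)).map (fun k => Fval H (k + 1)) := by
  rw [List.map_map]
  apply List.map_congr_left
  intro k hk
  rw [List.mem_range] at hk
  exact A_elem H k (by omega)

-- ===== VERDICT (by name: the statement is the Claim_ definition above) =====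
theorem solution_spec : Claim_equal_solution := by
  intro H _ hpre
  unfold Pre_solution at hpre
  unfold Spec_solution solution solution_alt
  simp only []
  rw [PySem.List.foldl_append_singleton_eq_map]
  have hr : ((H.length : Int) - 1) = ((H.length - 1 : Nat) : Int) := by omega
  rw [hr, PySem.List.pyRange_zero_nat, List.nil_append, A_map H (by omega)]
  rw [sufList_build, List.reverse_reverse]
  have hpm0 : H.headD 0 = dmax (H.take 1) := by
    cases H with
    | nil => simp at hpre
    | cons x t => simp [dmax]
  rw [hpm0]
  have hB := B_loop H (H.length - 1) 1 none (le_refl 1) (by omega)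
  rw [show ((1 : Nat) : Int) = 1 from rfl] at hB
  rw [hB]
  obtain ⟨m, hm⟩ : ∃ m, H.length - 1 = m + 1 := ⟨H.length - 2, by omega⟩
  rw [hm, List.range_succ_eq_map]
  simp only [List.map_cons, List.map_map, List.foldl_cons]
  rw [PySem.List.min?_id_cons]
  simp only [minStep, Option.getD_some]
  rw [foldl_minStep_some, Option.getD_some]
  congr 1
  apply List.map_congr_left
  intro a _
  simp only [Function.comp, Nat.succ_eq_add_one]
  congr 1
  omega
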